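-- pv_equiv track=rewrite | github.com/kesler20/draw-uml-backend | comment_generator/main.py | return_params
-- ===== SOURCE A (Python) =====
-- def return_params(line: str):
--     line = line.split("(")[1]
--     line = line.split(")")[0]
--     line = [line.replace(" ", "") for line in line.split(":")]
--     final_line = []
--     for line in [param.split(",") for param in line]:
--         if type(line) == str:
--             final_line.append(line)
--         else:
--             for param in line:
--                 final_line.append(param)
--     return final_line
-- ===== SOURCE B (Python) =====
-- def return_params(line: str):
--     inner = line.split("(")[1].split(")")[0]
--     out, cur = [], []
--     for ch in inner:
--         if ch == ":" or ch == ",":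
--             out.append("".join(cur))
--             cur = []
--         elif ch != " ":
--             cur.append(ch)
--     out.append("".join(cur))
--     return out
-- ===== Notes on version B (the rewrite author's own statement) =====
-- stated objective: alternative
-- what changed: Replaces A's split-on-':' / per-piece space-replace / split-on-',' / explicit flatten pipeline with a single left-to-right character scan over the parenthesised text that maintains one accumulator, emitting a token at each ':' or ',' and skipping spaces.
import Mathlib
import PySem

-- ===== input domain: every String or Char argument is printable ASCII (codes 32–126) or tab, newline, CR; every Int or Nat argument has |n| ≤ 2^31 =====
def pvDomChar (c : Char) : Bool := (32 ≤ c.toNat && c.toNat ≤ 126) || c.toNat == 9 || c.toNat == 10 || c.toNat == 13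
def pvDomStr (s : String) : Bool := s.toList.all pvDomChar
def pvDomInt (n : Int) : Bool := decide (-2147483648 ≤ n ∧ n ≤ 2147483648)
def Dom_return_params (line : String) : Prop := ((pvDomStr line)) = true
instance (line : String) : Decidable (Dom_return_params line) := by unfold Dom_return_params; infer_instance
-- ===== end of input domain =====

-- B replaces A's split/replace/split/flatten pipeline with a single character scan; same values, no speed claim.

-- ===== PORT A =====
-- indexing [1] after the first split raises IndexError when the opening parenthesis is absent (excluded by Pre_); the
-- 'type(line) == str' branch of A's loop is dead code (split always returns a list), so the
-- flatten loop is ported as a fold appending each sublist.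
def return_params (line : String) : List String :=
  match PySem.List.pyGet? (PySem.Chars.splitOn line.toList ['(']) 1 with
  | none => []
  | some s1 =>
    match PySem.List.pyGet? (PySem.Chars.splitOn s1 [')']) 0 with
    | none => []
    | some s2 =>
      let pieces := (PySem.Chars.splitOn s2 [':']).map (fun p => PySem.Chars.replace p [' '] [])
      let final := pieces.foldl (fun acc p => acc ++ PySem.Chars.splitOn p [',']) []
      final.map String.ofList

-- ===== PORT B =====
-- same prefix as A (text between the first parenthesis pair); then one fold over the characters;
-- Python joins cur at append time, the port keeps char lists and maps String.ofList at the end.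
def return_params_alt (line : String) : List String :=
  match PySem.List.pyGet? (PySem.Chars.splitOn line.toList ['(']) 1 with
  | none => []
  | some s1 =>
    match PySem.List.pyGet? (PySem.Chars.splitOn s1 [')']) 0 with
    | none => []
    | some inner =>
      let st := inner.foldl
        (fun (s : List (List Char) × List Char) ch =>
          if ch = ':' ∨ ch = ',' then (s.1 ++ [s.2], [])
          else if ch = ' ' then s
          else (s.1, s.2 ++ [ch])) ([], [])
      (st.1 ++ [st.2]).map String.ofList

-- ===== PRECONDITION & SPEC =====
-- Pre_ excludes exactly the lines containing no opening parenthesis, on which Python A raises IndexError.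
def Pre_return_params (line : String) : Prop := '(' ∈ line.toList
instance (line : String) : Decidable (Pre_return_params line) := by unfold Pre_return_params; infer_instance
def pvWitness_return_params : String := "def f(a: int, b: str):"

def Spec_return_params (line : String) (out : List String) : Prop := out = return_params_alt line
instance (line : String) (out : List String) : Decidable (Spec_return_params line out) := by unfold Spec_return_params; infer_instance

-- ===== CLAIM (what is proved, stated in full; the proofs are below) =====
def Claim_equal_return_params : Prop := ∀ (line : String), Dom_return_params line → Pre_return_params line → Spec_return_params line (return_params line)

-- ===== LEMMAS AND PROOFS =====
def ns (c : Char) : Bool := c ≠ ' '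

def sp (p : Char → Bool) : List Char → List Char × List (List Char)
  | [] => ([], [])
  | c :: t => let r := sp p t; if p c then ([], r.1 :: r.2) else (c :: r.1, r.2)

lemma splitOn_go_single (d : Char) :
    ∀ (l : List Char) (fuel : Nat) (cur : List Char) (acc : List (List Char)),
      l.length < fuel →
      PySem.Chars.splitOn.go [d] fuel l cur acc
        = acc.reverse ++ ((cur.reverse ++ (sp (· == d) l).1) :: (sp (· == d) l).2) := by
  intro l
  induction l with
  | nil =>
    intro fuel cur acc h
    cases fuel with
    | zero => omega
    | succ f => simp [PySem.Chars.splitOn.go, sp]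
  | cons c t ih =>
    intro fuel cur acc h
    cases fuel with
    | zero => omega
    | succ f =>
      rw [PySem.Chars.splitOn.go]
      by_cases hc : c = d
      · subst hc
        have hp : List.isPrefixOf [c] (c :: t) = true := by simp [List.isPrefixOf]
        simp only [hp, if_pos, List.length_cons, List.length_nil, List.drop_succ_cons,
          List.drop_zero, if_true]
        rw [ih f [] ((cur.reverse) :: acc) (by simp at h; omega)]
        simp [sp]
      · have hp : List.isPrefixOf [d] (c :: t) = false := by
          simp [List.isPrefixOf]; exact fun h' => (hc h'.symm).elim
        simp only [hp, Bool.false_eq_true, if_false]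
        rw [ih f (c :: cur) acc (by simp at h; omega)]
        simp [sp, hc]

lemma splitOn_single (d : Char) (l : List Char) :
    PySem.Chars.splitOn l [d] = (sp (· == d) l).1 :: (sp (· == d) l).2 := by
  unfold PySem.Chars.splitOn
  rw [splitOn_go_single d l (l.length + 1) [] [] (by omega)]
  simp

lemma replace_go_space :
    ∀ (l : List Char) (fuel : Nat) (acc : List Char),
      l.length ≤ fuel →
      PySem.Chars.replace.go [' '] [] fuel l acc = acc.reverse ++ l.filter ns := by
  intro l
  induction l with
  | nil =>
    intro fuel acc h
    cases fuel with
    | zero => simp [PySem.Chars.replace.go]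
    | succ f => simp [PySem.Chars.replace.go]
  | cons c t ih =>
    intro fuel acc h
    cases fuel with
    | zero => simp at h
    | succ f =>
      rw [PySem.Chars.replace.go]
      by_cases hc : c = ' '
      · subst hc
        have hp : List.isPrefixOf [' '] (' ' :: t) = true := by simp [List.isPrefixOf]
        simp only [hp, if_pos, List.length_cons, List.length_nil, List.drop_succ_cons,
          List.drop_zero, List.reverse_nil, List.nil_append]
        rw [ih f acc (by simp at h; omega)]
        simp [ns]
      · have hp : List.isPrefixOf [' '] (c :: t) = false := by
          simp [List.isPrefixOf]; exact fun h' => (hc h'.symm).elim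
        simp only [hp, Bool.false_eq_true, if_false]
        rw [ih f (c :: acc) (by simp at h; omega)]
        simp [ns, hc]

lemma replace_space (l : List Char) :
    PySem.Chars.replace l [' '] [] = l.filter ns := by
  unfold PySem.Chars.replace
  rw [if_neg (by simp)]
  rw [replace_go_space l l.length [] (le_refl _)]
  simp

def sf : List Char → List Char × List (List Char)
  | [] => ([], [])
  | c :: t =>
    let r := sf t
    if c = ':' ∨ c = ',' then ([], r.1 :: r.2)
    else if c = ' ' then r
    else (c :: r.1, r.2)

lemma pipeline_pair (l : List Char) :
    (sp (· == ',') (((sp (· == ':') l).1).filter ns)).1 = (sf l).1 ∧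
    (sp (· == ',') (((sp (· == ':') l).1).filter ns)).2
        ++ ((sp (· == ':') l).2).flatMap
            (fun p => (sp (· == ',') (p.filter ns)).1 :: (sp (· == ',') (p.filter ns)).2)
      = (sf l).2 := by
  induction l with
  | nil => exact ⟨rfl, rfl⟩
  | cons c t ih =>
    obtain ⟨ih1, ih2⟩ := ih
    by_cases h1 : c = ':'
    · subst h1
      refine ⟨rfl, ?_⟩
      simp only [sp, sf, if_pos rfl, if_pos (Or.inl rfl), List.flatMap_cons]
      rw [← ih1, ← ih2]
      rfl
    · by_cases h2 : c = ','
      · subst h2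
        refine ⟨by simp [sp, sf, List.filter_cons, ns], ?_⟩
        simp only [sp, sf, List.filter_cons, show ns ',' = true from rfl, if_pos,
          show ((',':Char) == ':') = false from rfl, Bool.false_eq_true, if_false,
          show ((',':Char) == ',') = true from rfl, if_pos (Or.inr rfl), List.flatMap_cons]
        rw [← ih1, ← ih2]
        rfl
      · by_cases h3 : c = ' '
        · subst h3
          have hif : ¬((' ':Char) = ':' ∨ (' ':Char) = ',') := by decide
          refine ⟨?_, ?_⟩
          · simpa only [sp, sf, List.filter_cons, show ns ' ' = false from rfl,
              show ((' ':Char) == ':') = false from rfl, Bool.false_eq_true, if_false,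
              if_neg hif, if_pos rfl] using ih1
          · simpa only [sp, sf, List.filter_cons, show ns ' ' = false from rfl,
              show ((' ':Char) == ':') = false from rfl, Bool.false_eq_true, if_false,
              if_neg hif, if_pos rfl] using ih2
        · have e1 : (c == ':') = false := by simp [h1]
          have e2 : (c == ',') = false := by simp [h2]
          have e3 : ns c = true := by simp [ns, h3]
          have hif : ¬(c = ':' ∨ c = ',') := by tauto
          refine ⟨?_, ?_⟩
          · simp only [sp, sf, List.filter_cons, e1, e2, e3, Bool.false_eq_true, if_false,
              if_pos, if_neg hif, if_neg h3]
            rw [ih1]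
          · simpa only [sp, sf, List.filter_cons, e1, e2, e3, Bool.false_eq_true, if_false,
              if_pos, if_neg hif, if_neg h3] using ih2

lemma pipeline_eq (l : List Char) :
    ((sp (· == ':') l).1 :: (sp (· == ':') l).2).flatMap
        (fun p => (sp (· == ',') (p.filter ns)).1 :: (sp (· == ',') (p.filter ns)).2)
      = (sf l).1 :: (sf l).2 := by
  obtain ⟨h1, h2⟩ := pipeline_pair l
  simp only [List.flatMap_cons]
  rw [← h1, ← h2]
  rfl

lemma foldl_app {α β : Type} (f : β → List α) :
    ∀ (L : List β) (acc : List α), L.foldl (fun a x => a ++ f x) acc = acc ++ L.flatMap f := by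
  intro L
  induction L with
  | nil => simp
  | cons x t ih => intro acc; simp [List.foldl_cons, ih, List.flatMap_cons]

lemma foldl_scan :
    ∀ (l : List Char) (out : List (List Char)) (cur : List Char),
      (l.foldl
        (fun (s : List (List Char) × List Char) ch =>
          if ch = ':' ∨ ch = ',' then (s.1 ++ [s.2], [])
          else if ch = ' ' then s
          else (s.1, s.2 ++ [ch])) (out, cur)).1
      ++ [(l.foldl
        (fun (s : List (List Char) × List Char) ch =>
          if ch = ':' ∨ ch = ',' then (s.1 ++ [s.2], [])
          else if ch = ' ' then s
          else (s.1, s.2 ++ [ch])) (out, cur)).2]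
      = out ++ ((cur ++ (sf l).1) :: (sf l).2) := by
  intro l
  induction l with
  | nil => intro out cur; simp [sf]
  | cons c t ih =>
    intro out cur
    by_cases hd : c = ':' ∨ c = ','
    · simp only [List.foldl_cons, if_pos hd, sf]
      rw [ih (out ++ [cur]) []]
      simp
    · by_cases hs : c = ' '
      · simp only [List.foldl_cons, sf, if_neg hd, if_pos hs]
        exact ih out cur
      · simp only [List.foldl_cons, if_neg hd, if_neg hs, sf]
        rw [ih out (cur ++ [c])]
        simp [if_neg hd, if_neg hs]

lemma core_eq (l : List Char) :
    (((PySem.Chars.splitOn l [':']).map (fun p => PySem.Chars.replace p [' '] [])).foldl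
        (fun acc p => acc ++ PySem.Chars.splitOn p [',']) []).map String.ofList
      = (let st := l.foldl
          (fun (s : List (List Char) × List Char) ch =>
            if ch = ':' ∨ ch = ',' then (s.1 ++ [s.2], [])
            else if ch = ' ' then s
            else (s.1, s.2 ++ [ch])) ([], []);
         (st.1 ++ [st.2]).map String.ofList) := by
  simp only []
  rw [foldl_scan l [] []]
  rw [foldl_app (fun p => PySem.Chars.splitOn p [','])]
  simp only [replace_space, List.nil_append]
  have hm : ∀ (ps : List (List Char)),
      (ps.map (fun p => p.filter ns)).flatMap (fun p => PySem.Chars.splitOn p [','])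
        = ps.flatMap (fun p => (sp (· == ',') (p.filter ns)).1 :: (sp (· == ',') (p.filter ns)).2) := by
    intro ps
    rw [List.flatMap_map]
    congr 1
    funext p
    simp [Function.comp, splitOn_single]
  rw [splitOn_single, hm, pipeline_eq]

-- ===== VERDICT (by name: the statement is the Claim_ definition above) =====
theorem return_params_spec : Claim_equal_return_params := by
  intro line _ _
  unfold Spec_return_params return_params return_params_alt
  cases PySem.List.pyGet? (PySem.Chars.splitOn line.toList ['(']) 1 with
  | none => rfl
  | some s1 =>
    simp only []
    cases PySem.List.pyGet? (PySem.Chars.splitOn s1 [')']) 0 with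
    | none => rfl
    | some s2 => exact core_eq s2
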